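-- pv_equiv track=rewrite | github.com/JaydenPahukula/competitive-coding | codeforces/855/A.py | isMeow
-- ===== SOURCE A (Python) =====
-- def isMeow(s:str):
--     i = 0
--     check = ["Mm", "Ee", "Oo", "Ww", ""]
--     for c in s:
--         if c not in check[i]:
--             if c not in check[i+1]:
--                 return False
--             i += 1
--     return i == 3
-- ===== SOURCE B (Python) =====
-- def isMeow(s: str):
--     rest = s.lstrip("Mm")
--     for letters in ("Ee", "Oo", "Ww"):
--         stripped = rest.lstrip(letters)
--         if stripped == rest:
--             return False
--         rest = stripped
--     return rest == ""
-- ===== Notes on version B (the rewrite author's own statement) =====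
-- stated objective: simpler
-- what changed: Replaced the 5-state character-by-character state machine (index into a check list, advance-or-fail per char) by sequentially stripping the letter runs: lstrip the optional Mm run, then require a nonempty Ee, Oo and Ww run via lstrip, and accept iff nothing remains.
import Mathlib
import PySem

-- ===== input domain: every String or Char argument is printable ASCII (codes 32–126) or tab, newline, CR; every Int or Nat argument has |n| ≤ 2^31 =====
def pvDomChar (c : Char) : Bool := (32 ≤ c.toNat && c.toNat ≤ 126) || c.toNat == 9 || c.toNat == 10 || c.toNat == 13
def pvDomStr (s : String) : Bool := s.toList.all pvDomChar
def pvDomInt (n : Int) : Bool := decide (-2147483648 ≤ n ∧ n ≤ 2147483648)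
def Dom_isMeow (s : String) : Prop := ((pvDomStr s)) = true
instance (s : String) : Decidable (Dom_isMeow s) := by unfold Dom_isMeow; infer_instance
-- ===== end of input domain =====

-- B replaces A's 5-state character-by-character state machine by stripping the four
-- letter runs in sequence (M* then E+ O+ W+) — simpler; same O(n) cost.

-- ===== PORT A =====
-- A's check list: strings as character lists
def pvCheck : List (List Char) := [['M','m'], ['E','e'], ['O','o'], ['W','w'], []]

-- the for-loop with early return; i stays ≤ 3 (advancing needs a char in check[i+1],
-- and check[4] = "" contains none), so check[i+1] is always in range
def isMeowGo (i : Nat) : List Char → Bool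
  | [] => i == 3
  | c :: cs =>
    if (pvCheck.getD i []).contains c then isMeowGo i cs
    else if (pvCheck.getD (i+1) []).contains c then isMeowGo (i+1) cs
    else false

def isMeow (s : String) : Bool := isMeowGo 0 s.toList

-- ===== PORT B =====
-- rest.lstrip(letters) = dropWhile membership on the character list (exact on ASCII)
-- the for-loop over ("Ee","Oo","Ww") with early return False, then rest == ""
def isMeowAltGo : List Char → List (List Char) → Bool
  | rest, [] => rest.isEmpty
  | rest, ls :: lss =>
    let stripped := rest.dropWhile (fun c => ls.contains c)
    if stripped = rest then false else isMeowAltGo stripped lss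

def isMeow_alt (s : String) : Bool :=
  isMeowAltGo (s.toList.dropWhile (fun c => (['M','m'] : List Char).contains c))
    [['E','e'], ['O','o'], ['W','w']]

-- ===== PRECONDITION & SPEC =====
def Spec_isMeow (s : String) (out : Bool) : Prop := out = isMeow_alt s
instance (s : String) (out : Bool) : Decidable (Spec_isMeow s out) := by unfold Spec_isMeow; infer_instance

-- ===== CLAIM (what is proved, stated in full; the proofs are below) =====
def Claim_equal_isMeow : Prop := ∀ (s : String), Dom_isMeow s → Spec_isMeow s (isMeow s)

-- ===== LEMMAS AND PROOFS =====

theorem stripped_ne_cons (p : Char → Bool) (c : Char) (cs : List Char) :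
    cs.dropWhile p ≠ c :: cs := by
  intro h
  have := List.length_dropWhile_le p cs
  rw [h] at this
  simp at this

theorem L3 (l : List Char) :
    isMeowGo 3 l = (l.dropWhile (fun c => (['W','w'] : List Char).contains c)).isEmpty := by
  induction l with
  | nil => simp [isMeowGo]
  | cons c cs ih =>
    by_cases h : (['W','w'] : List Char).contains c = true
    · have hstep : isMeowGo 3 (c :: cs) = isMeowGo 3 cs := by
        rcases (by simpa using h : c = _ ∨ c = _) with h | h <;> subst h <;>
          simp [isMeowGo, pvCheck]
      rw [hstep, ih, List.dropWhile_cons_of_pos h]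
    · have hstep : isMeowGo 3 (c :: cs) = false := by
        simp only [List.contains_eq_mem, decide_eq_true_eq] at h
        simp at h
        simp [isMeowGo, pvCheck, h.1, h.2]
      rw [List.dropWhile_cons_of_neg h, hstep]
      simp [List.isEmpty]

theorem L2 (l : List Char) :
    isMeowGo 2 l =
      isMeowAltGo (l.dropWhile (fun c => (['O','o'] : List Char).contains c))
        [['W','w']] := by
  induction l with
  | nil => simp [isMeowGo, isMeowAltGo]
  | cons c cs ih =>
    by_cases hI : (['O','o'] : List Char).contains c = true
    · have hstep : isMeowGo 2 (c :: cs) = isMeowGo 2 cs := by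
        rcases (by simpa using hI : c = _ ∨ c = _) with h | h <;> subst h <;>
          simp [isMeowGo, pvCheck]
      rw [hstep, ih, List.dropWhile_cons_of_pos hI]
    · by_cases hN : (['W','w'] : List Char).contains c = true
      · have hstep : isMeowGo 2 (c :: cs) = isMeowGo 3 cs := by
          rcases (by simpa using hN : c = _ ∨ c = _) with h | h <;> subst h <;>
            simp [isMeowGo, pvCheck]
        rw [List.dropWhile_cons_of_neg hI, hstep, L3]
        simp only [isMeowAltGo]
        rw [List.dropWhile_cons_of_pos hN, if_neg (stripped_ne_cons _ c cs)]
      · have hstep : isMeowGo 2 (c :: cs) = false := by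
          simp only [List.contains_eq_mem, decide_eq_true_eq] at hI hN
          simp at hI hN
          simp [isMeowGo, pvCheck, hI.1, hI.2, hN.1, hN.2]
        rw [List.dropWhile_cons_of_neg hI, hstep]
        simp only [isMeowAltGo]
        rw [List.dropWhile_cons_of_neg hN, if_pos rfl]

theorem L1 (l : List Char) :
    isMeowGo 1 l =
      isMeowAltGo (l.dropWhile (fun c => (['E','e'] : List Char).contains c))
        [['O','o'], ['W','w']] := by
  induction l with
  | nil => simp [isMeowGo, isMeowAltGo]
  | cons c cs ih =>
    by_cases hI : (['E','e'] : List Char).contains c = true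
    · have hstep : isMeowGo 1 (c :: cs) = isMeowGo 1 cs := by
        rcases (by simpa using hI : c = _ ∨ c = _) with h | h <;> subst h <;>
          simp [isMeowGo, pvCheck]
      rw [hstep, ih, List.dropWhile_cons_of_pos hI]
    · by_cases hN : (['O','o'] : List Char).contains c = true
      · have hstep : isMeowGo 1 (c :: cs) = isMeowGo 2 cs := by
          rcases (by simpa using hN : c = _ ∨ c = _) with h | h <;> subst h <;>
            simp [isMeowGo, pvCheck]
        rw [List.dropWhile_cons_of_neg hI, hstep, L2]
        simp only [isMeowAltGo]
        rw [List.dropWhile_cons_of_pos hN, if_neg (stripped_ne_cons _ c cs)]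
      · have hstep : isMeowGo 1 (c :: cs) = false := by
          simp only [List.contains_eq_mem, decide_eq_true_eq] at hI hN
          simp at hI hN
          simp [isMeowGo, pvCheck, hI.1, hI.2, hN.1, hN.2]
        rw [List.dropWhile_cons_of_neg hI, hstep]
        simp only [isMeowAltGo]
        rw [List.dropWhile_cons_of_neg hN, if_pos rfl]

theorem L0 (l : List Char) :
    isMeowGo 0 l =
      isMeowAltGo (l.dropWhile (fun c => (['M','m'] : List Char).contains c))
        [['E','e'], ['O','o'], ['W','w']] := by
  induction l with
  | nil => simp [isMeowGo, isMeowAltGo]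
  | cons c cs ih =>
    by_cases hI : (['M','m'] : List Char).contains c = true
    · have hstep : isMeowGo 0 (c :: cs) = isMeowGo 0 cs := by
        rcases (by simpa using hI : c = _ ∨ c = _) with h | h <;> subst h <;>
          simp [isMeowGo, pvCheck]
      rw [hstep, ih, List.dropWhile_cons_of_pos hI]
    · by_cases hN : (['E','e'] : List Char).contains c = true
      · have hstep : isMeowGo 0 (c :: cs) = isMeowGo 1 cs := by
          rcases (by simpa using hN : c = _ ∨ c = _) with h | h <;> subst h <;>
            simp [isMeowGo, pvCheck]
        rw [List.dropWhile_cons_of_neg hI, hstep, L1]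
        simp only [isMeowAltGo]
        rw [List.dropWhile_cons_of_pos hN, if_neg (stripped_ne_cons _ c cs)]
      · have hstep : isMeowGo 0 (c :: cs) = false := by
          simp only [List.contains_eq_mem, decide_eq_true_eq] at hI hN
          simp at hI hN
          simp [isMeowGo, pvCheck, hI.1, hI.2, hN.1, hN.2]
        rw [List.dropWhile_cons_of_neg hI, hstep]
        simp only [isMeowAltGo]
        rw [List.dropWhile_cons_of_neg hN, if_pos rfl]

-- ===== VERDICT (by name: the statement is the Claim_ definition above) =====
theorem isMeow_spec : Claim_equal_isMeow := by
  intro s _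
  unfold Spec_isMeow isMeow isMeow_alt
  exact L0 s.toList
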